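-- pv_equiv track=rewrite | github.com/Melat369/A2SV-Progress-Sheet-Questions | D_Team_Formation.py | PaulosTeamFormation
-- ===== SOURCE A (Python) =====
-- def PaulosTeamFormation(n, arr):
--     arr.sort()
--     count = 0
--     left = 0
--     right = 0
--
--     while right < n:
--         if arr[right] - arr[left] <= 5:
--             count = max(count, right - left + 1)
--             right += 1
--         else:
--             left += 1
--
--     return count
-- ===== SOURCE B (Python) =====
-- def PaulosTeamFormation(n, arr):
--     arr.sort()
--     count = 0
--     for i in range(n):
--         x = arr[i] + 5
--         lo, hi = i, n
--         while lo < hi: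
--             mid = (lo + hi) // 2
--             if arr[mid] <= x:
--                 lo = mid + 1
--             else:
--                 hi = mid
--         count = max(count, lo - i)
--     return count
-- ===== Notes on version B (the rewrite author's own statement) =====
-- stated objective: alternative
-- what changed: Replaces A's incremental two-pointer sliding window over the sorted array with a per-element hand-written binary search (bisect_right) for the first value exceeding arr[i]+5.
import Mathlib
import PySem

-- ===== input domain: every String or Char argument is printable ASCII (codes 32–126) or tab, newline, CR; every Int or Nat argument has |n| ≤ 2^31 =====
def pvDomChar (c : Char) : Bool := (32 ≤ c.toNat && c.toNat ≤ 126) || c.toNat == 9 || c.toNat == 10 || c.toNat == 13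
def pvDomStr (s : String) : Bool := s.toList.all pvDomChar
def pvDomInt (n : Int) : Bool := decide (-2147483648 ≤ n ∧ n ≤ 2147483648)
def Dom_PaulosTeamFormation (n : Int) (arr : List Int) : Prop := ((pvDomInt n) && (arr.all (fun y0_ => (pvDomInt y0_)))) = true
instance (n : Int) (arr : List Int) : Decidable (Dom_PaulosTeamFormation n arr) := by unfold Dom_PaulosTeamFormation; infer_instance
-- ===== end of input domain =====

-- B replaces A's two-pointer sliding window by a per-element binary search on the sorted
-- array (alternative algorithm, same cost class). Both Pythons sort arr in place; the
-- equivalence proved here is about the return value.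

-- ===== PORT A =====
-- A's while-loop: state (count, left, right); recursion on a fuel that provably covers
-- every iteration (each step increments left or right, both bounded). On IndexError
-- (pyGet? = none) the loop body cannot run, the port returns count there; those inputs
-- are excluded by Pre_.
def pvLoopAGo (s : List Int) (n : Int) : Nat → Int → Int → Int → Int
  | 0, count, _, _ => count
  | fuel + 1, count, left, right =>
    if right < n then
      match PySem.List.pyGet? s right, PySem.List.pyGet? s left with
      | some r, some l =>
        if r - l ≤ 5 then pvLoopAGo s n fuel (max count (right - left + 1)) left (right + 1)
        else pvLoopAGo s n fuel count (left + 1) right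
      | _, _ => count
    else count

def PaulosTeamFormation (n : Int) (arr : List Int) : Int :=
  let s := PySem.List.sorted arr (fun x => x) false
  pvLoopAGo s n (n.toNat + s.length) 0 0 0

-- ===== PORT B =====
-- hand-written bisect_right of Source B: first index in [lo, hi) whose value exceeds x;
-- the interval shrinks every iteration, so (hi - lo).toNat steps of fuel suffice
def pvBisectGo (s : List Int) (x : Int) : Nat → Int → Int → Int
  | 0, lo, _ => lo
  | fuel + 1, lo, hi =>
    if lo < hi then
      match PySem.List.pyGet? s (PySem.Int.floordiv (lo + hi) 2) with
      | some v =>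
        if v ≤ x then pvBisectGo s x fuel (PySem.Int.floordiv (lo + hi) 2 + 1) hi
        else pvBisectGo s x fuel lo (PySem.Int.floordiv (lo + hi) 2)
      | none => lo
    else lo

def pvBisect (s : List Int) (x lo hi : Int) : Int :=
  pvBisectGo s x (hi - lo).toNat lo hi

def PaulosTeamFormation_alt (n : Int) (arr : List Int) : Int :=
  let s := PySem.List.sorted arr (fun x => x) false
  (PySem.List.pyRange 0 n 1).foldl (fun count i =>
    match PySem.List.pyGet? s i with
    | some v => max count (pvBisect s (v + 5) i n - i)
    | none => count) 0

-- ===== PRECONDITION & SPEC =====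
-- Pre_ excludes exactly the inputs with n > len(arr), on which A (and B) raise IndexError.
def Pre_PaulosTeamFormation (n : Int) (arr : List Int) : Prop := n ≤ (arr.length : Int)
instance (n : Int) (arr : List Int) : Decidable (Pre_PaulosTeamFormation n arr) := by
  unfold Pre_PaulosTeamFormation; infer_instance

def pvWitness_PaulosTeamFormation : Int × List Int := (3, [4, 11, 1])

def Spec_PaulosTeamFormation (n : Int) (arr : List Int) (out : Int) : Prop := out = PaulosTeamFormation_alt n arr
instance (n : Int) (arr : List Int) (out : Int) : Decidable (Spec_PaulosTeamFormation n arr out) := by unfold Spec_PaulosTeamFormation; infer_instance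

-- ===== CLAIM (what is proved, stated in full; the proofs are below) =====
def Claim_equal_PaulosTeamFormation : Prop := ∀ (n : Int) (arr : List Int), Dom_PaulosTeamFormation n arr → Pre_PaulosTeamFormation n arr → Spec_PaulosTeamFormation n arr (PaulosTeamFormation n arr)

-- ===== LEMMAS AND PROOFS =====

-- the common specification: length of the longest window [i, j] with i < c, j < r and
-- s[j] - s[i] ≤ 5 (pvBest2 s r r is the answer both programs compute)
def pvBest2 (s : List Int) (c r : Nat) : Nat :=
  ((Finset.range c ×ˢ Finset.range r).filter
    (fun p => p.1 ≤ p.2 ∧ s.getD p.2 0 - s.getD p.1 0 ≤ 5)).sup (fun p => p.2 - p.1 + 1)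

theorem pvBest2_zero (s : List Int) (r : Nat) : pvBest2 s 0 r = 0 := by
  simp [pvBest2]

theorem pvBest2_le (s : List Int) (c r : Nat) {B : Nat}
    (h : ∀ i j : Nat, i < c → j < r → i ≤ j → s.getD j 0 - s.getD i 0 ≤ 5 → j - i + 1 ≤ B) :
    pvBest2 s c r ≤ B := by
  apply Finset.sup_le
  intro p hp
  simp only [Finset.mem_filter, Finset.mem_product, Finset.mem_range] at hp
  exact h p.1 p.2 hp.1.1 hp.1.2 hp.2.1 hp.2.2

theorem pvBest2_ge (s : List Int) (c r : Nat) (i j : Nat)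
    (hi : i < c) (hj : j < r) (hij : i ≤ j) (hd : s.getD j 0 - s.getD i 0 ≤ 5) :
    j - i + 1 ≤ pvBest2 s c r := by
  apply Finset.le_sup (f := fun p : Nat × Nat => p.2 - p.1 + 1) (b := (i, j))
  simp only [Finset.mem_filter, Finset.mem_product, Finset.mem_range]
  exact ⟨⟨hi, hj⟩, hij, hd⟩

theorem pvGet_eq (s : List Int) (i : Int) (v : Int) (h0 : 0 ≤ i) (hlen : i < (s.length : Int))
    (h : PySem.List.pyGet? s i = some v) : v = s.getD i.toNat 0 := by
  rw [PySem.List.pyGet?_of_nonneg _ h0] at h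
  have hi : i.toNat < s.length := by omega
  rw [List.getElem?_eq_getElem hi] at h
  rw [List.getD_eq_getElem?_getD, List.getElem?_eq_getElem hi]
  simpa using h.symm

-- step of A's window: extending the prefix by index r when the window [l, r] fits
theorem pvBest2_step (s : List Int) (l r : Nat) (hlr : l ≤ r)
    (hbad : ∀ i : Nat, i < l → ¬ (s.getD r 0 - s.getD i 0 ≤ 5))
    (hok : s.getD r 0 - s.getD l 0 ≤ 5) :
    pvBest2 s (r + 1) (r + 1) = max (pvBest2 s r r) (r - l + 1) := by
  apply Nat.le_antisymm
  · apply pvBest2_le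
    intro i j hi hj hij hd
    by_cases hjr : j < r
    · exact le_trans (pvBest2_ge s r r i j (by omega) hjr hij hd) (le_max_left _ _)
    · have hjr' : j = r := by omega
      rw [hjr'] at hd
      have hil : l ≤ i := by
        by_contra hc
        exact hbad i (by omega) hd
      exact le_trans (by omega) (le_max_right (pvBest2 s r r) (r - l + 1))
  · apply max_le
    · apply pvBest2_le
      intro i j hi hj hij hd
      exact pvBest2_ge s (r + 1) (r + 1) i j (by omega) (by omega) hij hd
    · exact pvBest2_ge s (r + 1) (r + 1) l r (by omega) (by omega) hlr hok

-- A's loop computes pvBest2 n n (invariant-carrying correctness of the two-pointer scan)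
theorem pvLoopAGo_eq (s : List Int) (n : Int)
    (hmono : ∀ p q : Nat, p ≤ q → q < s.length → s.getD p 0 ≤ s.getD q 0)
    (hlen : n ≤ (s.length : Int)) :
    ∀ (fuel : Nat) (count left right : Int),
    (n - right).toNat + (s.length - left).toNat ≤ fuel →
    0 ≤ left → left ≤ right → right ≤ n →
    count = (pvBest2 s right.toNat right.toNat : Int) →
    (∀ i : Nat, (i : Int) < left → right < n → ¬ (s.getD right.toNat 0 - s.getD i 0 ≤ 5)) →
    pvLoopAGo s n fuel count left right = (pvBest2 s n.toNat n.toNat : Int) := by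
  intro fuel
  induction fuel with
  | zero =>
    intro count left right hf h0 hlr hrmax hcount hbad
    have hre : right = n := by omega
    simp only [pvLoopAGo]
    rw [hcount, hre]
  | succ fuel ih =>
    intro count left right hf h0 hlr hrmax hcount hbad
    simp only [pvLoopAGo]
    by_cases hrn : right < n
    · simp only [if_pos hrn]
      rcases h1 : PySem.List.pyGet? s right with _ | r
      · exfalso
        rw [PySem.List.pyGet?_eq_none_iff] at h1
        unfold PySem.Raise.InRange at h1
        omega
      rcases h2 : PySem.List.pyGet? s left with _ | l
      · exfalso
        rw [PySem.List.pyGet?_eq_none_iff] at h2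
        unfold PySem.Raise.InRange at h2
        omega
      have hrv : r = s.getD right.toNat 0 := pvGet_eq s right r (by omega) (by omega) h1
      have hlv : l = s.getD left.toNat 0 := pvGet_eq s left l (by omega) (by omega) h2
      by_cases hcond : r - l ≤ 5
      · simp only [if_pos hcond]
        refine ih _ _ _ (by omega) h0 (by omega) (by omega) ?_ ?_
        · have h1' : (right + 1).toNat = right.toNat + 1 := by omega
          rw [h1', pvBest2_step s left.toNat right.toNat (by omega)
                (fun i hi => hbad i (by omega) hrn) (by rw [← hrv, ← hlv]; exact hcond)]
          have hc2 : right - left + 1 = ((right.toNat - left.toNat + 1 : Nat) : Int) := by omega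
          rw [hcount, hc2, Nat.cast_max]
        · intro i hi hrn1
          have h1' : (right + 1).toNat = right.toNat + 1 := by omega
          rw [h1']
          have hstep : s.getD right.toNat 0 ≤ s.getD (right.toNat + 1) 0 :=
            hmono _ _ (by omega) (by omega)
          have := hbad i hi hrn
          omega
      · simp only [if_neg hcond]
        have hne : left ≠ right := by
          intro heq
          apply hcond
          rw [hrv, hlv]
          simp only [heq]
          omega
        have hllen : left < (s.length : Int) := by omega
        refine ih _ _ _ (by omega) (by omega) (by omega) hrmax hcount ?_
        intro i hi _
        by_cases hil : (i : Int) < left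
        · exact hbad i hil hrn
        · have hiv : i = left.toNat := by omega
          rw [hiv, ← hrv, ← hlv]
          omega
    · simp only [if_neg hrn]
      have hre : right = n := by omega
      rw [hcount, hre]

-- correctness of the hand-written bisect_right on a sorted list
theorem pvBisectGo_spec (s : List Int) (x : Int)
    (hmono : ∀ p q : Nat, p ≤ q → q < s.length → s.getD p 0 ≤ s.getD q 0) :
    ∀ (fuel : Nat) (lo hi : Int),
    (hi - lo).toNat ≤ fuel → 0 ≤ lo → lo ≤ hi → hi ≤ (s.length : Int) →
    lo ≤ pvBisectGo s x fuel lo hi ∧ pvBisectGo s x fuel lo hi ≤ hi ∧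
    (∀ k : Nat, lo ≤ (k : Int) → (k : Int) < pvBisectGo s x fuel lo hi → s.getD k 0 ≤ x) ∧
    (∀ k : Nat, pvBisectGo s x fuel lo hi ≤ (k : Int) → (k : Int) < hi → x < s.getD k 0) := by
  intro fuel
  induction fuel with
  | zero =>
    intro lo hi hf h0 hlh hhl
    have : lo = hi := by omega
    simp only [pvBisectGo]
    refine ⟨le_refl _, by omega, ?_, ?_⟩ <;> intro k hk1 hk2 <;> omega
  | succ fuel ih =>
    intro lo hi hf h0 hlh hhl
    simp only [pvBisectGo]
    by_cases hlt : lo < hi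
    · simp only [if_pos hlt]
      have hmid := PySem.Int.floordiv_two_mid_bounds (lo := lo) (hi := hi) (by omega)
      have hmid2 : PySem.Int.floordiv (lo + hi) 2 < hi := by
        rw [PySem.Int.floordiv_lt_iff_lt_mul (by omega)]; omega
      set mid := PySem.Int.floordiv (lo + hi) 2 with hmiddef
      rcases hv : PySem.List.pyGet? s mid with _ | v
      · exfalso
        rw [PySem.List.pyGet?_eq_none_iff] at hv
        unfold PySem.Raise.InRange at hv
        omega
      have hvval : v = s.getD mid.toNat 0 := pvGet_eq s mid v (by omega) (by omega) hv
      by_cases hvx : v ≤ x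
      · simp only [if_pos hvx]
        obtain ⟨ih1, ih2, ih3, ih4⟩ := ih (mid + 1) hi (by omega) (by omega) (by omega) hhl
        refine ⟨by omega, ih2, ?_, ih4⟩
        intro k hk1 hk2
        by_cases hkm : mid + 1 ≤ (k : Int)
        · exact ih3 k hkm hk2
        · calc s.getD k 0 ≤ s.getD mid.toNat 0 := hmono k mid.toNat (by omega) (by omega)
            _ ≤ x := by omega
      · simp only [if_neg hvx]
        obtain ⟨ih1, ih2, ih3, ih4⟩ := ih lo mid (by omega) h0 (by omega) (by omega)
        refine ⟨ih1, by omega, ih3, ?_⟩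
        intro k hk1 hk2
        by_cases hkm : (k : Int) < mid
        · exact ih4 k hk1 hkm
        · calc x < s.getD mid.toNat 0 := by omega
            _ ≤ s.getD k 0 := hmono mid.toNat k (by omega) (by omega)
    · simp only [if_neg hlt]
      refine ⟨le_refl _, by omega, ?_, ?_⟩ <;> intro k hk1 hk2 <;> omega

theorem pvBisect_spec (s : List Int) (x lo hi : Int)
    (hmono : ∀ p q : Nat, p ≤ q → q < s.length → s.getD p 0 ≤ s.getD q 0) :
    0 ≤ lo → lo ≤ hi → hi ≤ (s.length : Int) →
    lo ≤ pvBisect s x lo hi ∧ pvBisect s x lo hi ≤ hi ∧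
    (∀ k : Nat, lo ≤ (k : Int) → (k : Int) < pvBisect s x lo hi → s.getD k 0 ≤ x) ∧
    (∀ k : Nat, pvBisect s x lo hi ≤ (k : Int) → (k : Int) < hi → x < s.getD k 0) := by
  intro h0 hlh hhl
  exact pvBisectGo_spec s x hmono (hi - lo).toNat lo hi (le_refl _) h0 hlh hhl

-- step of B's fold: processing start index r adds exactly the best window starting at r
theorem pvBest2_succ (s : List Int) (m r : Nat)
    (hmono : ∀ p q : Nat, p ≤ q → q < s.length → s.getD p 0 ≤ s.getD q 0)
    (hr : r < m) (hmlen : m ≤ s.length) :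
    (pvBest2 s (r + 1) m : Int) =
      max (pvBest2 s r m : Int) (pvBisect s (s.getD r 0 + 5) (r : Int) (m : Int) - (r : Int)) := by
  obtain ⟨hb1, hb2, hb3, hb4⟩ :=
    pvBisect_spec s (s.getD r 0 + 5) (r : Int) (m : Int) hmono (by omega) (by omega) (by omega)
  set j := pvBisect s (s.getD r 0 + 5) (r : Int) (m : Int) with hjdef
  have hj1 : (r : Int) + 1 ≤ j := by
    by_contra hc
    have hjr : j = (r : Int) := by omega
    have := hb4 r (by omega) (by omega)
    omega
  have hjn : j = ((j.toNat : Nat) : Int) := by omega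
  set jn := j.toNat with hjndef
  have hnat : pvBest2 s (r + 1) m = max (pvBest2 s r m) (jn - r) := by
    apply Nat.le_antisymm
    · apply pvBest2_le
      intro i j' hi hj' hij hd
      by_cases hir : i < r
      · exact le_trans (pvBest2_ge s r m i j' hir hj' hij hd) (le_max_left _ _)
      · have hieq : i = r := by omega
        rw [hieq] at hd
        have hj'lt : j' < jn := by
          by_contra hc
          have := hb4 j' (by omega) (by omega)
          omega
        exact le_trans (by omega) (le_max_right (pvBest2 s r m) (jn - r))
    · apply max_le
      · apply pvBest2_le
        intro i j' hi hj' hij hd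
        exact pvBest2_ge s (r + 1) m i j' (by omega) hj' hij hd
      · have hlast : s.getD (jn - 1) 0 - s.getD r 0 ≤ 5 := by
          have := hb3 (jn - 1) (by omega) (by omega)
          omega
        have := pvBest2_ge s (r + 1) m r (jn - 1) (by omega) (by omega) (by omega) hlast
        omega
  have hc2 : ((jn - r : Nat) : Int) = j - (r : Int) := by omega
  rw [hnat, Nat.cast_max, hc2]

-- B's fold over the first r start indices computes pvBest2 r m
theorem pvFoldB (s : List Int) (n : Int)
    (hmono : ∀ p q : Nat, p ≤ q → q < s.length → s.getD p 0 ≤ s.getD q 0)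
    (hlen : n ≤ (s.length : Int)) (r : Nat) (hr : (r : Int) ≤ n) :
    (PySem.List.pyRange 0 (r : Int) 1).foldl (fun count i =>
      match PySem.List.pyGet? s i with
      | some v => max count (pvBisect s (v + 5) i n - i)
      | none => count) 0 = (pvBest2 s r n.toNat : Int) := by
  induction r with
  | zero =>
    rw [PySem.List.pyRange_one_eq_nil (by omega)]
    simp [pvBest2_zero]
  | succ r ih =>
    have hcast : ((r + 1 : Nat) : Int) = (r : Int) + 1 := by push_cast; ring
    rw [hcast, PySem.List.pyRange_one_succ_right (by omega), List.foldl_append,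
        ih (by omega)]
    simp only [List.foldl_cons, List.foldl_nil]
    have hrlen : r < s.length := by omega
    have hget : PySem.List.pyGet? s (r : Int) = some (s.getD r 0) := by
      rw [PySem.List.pyGet?_natCast, List.getElem?_eq_getElem hrlen,
          List.getD_eq_getElem?_getD, List.getElem?_eq_getElem hrlen]
      rfl
    rw [hget]
    show max ((pvBest2 s r n.toNat : Nat) : Int)
        (pvBisect s (s.getD r 0 + 5) (r : Int) n - (r : Int)) = (pvBest2 s (r + 1) n.toNat : Int)
    have hnm : n = ((n.toNat : Nat) : Int) := by omega
    rw [show pvBisect s (s.getD r 0 + 5) (r : Int) n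
          = pvBisect s (s.getD r 0 + 5) (r : Int) ((n.toNat : Nat) : Int) from by rw [← hnm]]
    rw [← pvBest2_succ s n.toNat r hmono (by omega) (by omega)]

-- monotonicity of the sorted list, in getD form
theorem pvSortedMono (arr : List Int) :
    ∀ p q : Nat, p ≤ q → q < (PySem.List.sorted arr (fun x => x) false).length →
      (PySem.List.sorted arr (fun x => x) false).getD p 0 ≤
      (PySem.List.sorted arr (fun x => x) false).getD q 0 := by
  intro p q hpq hq
  have h := PySem.List.sorted_id_getElem_mono arr hpq hq
  rw [List.getD_eq_getElem?_getD, List.getD_eq_getElem?_getD,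
      List.getElem?_eq_getElem hq, List.getElem?_eq_getElem (by omega : p < _)]
  exact h

-- ===== VERDICT (by name: the statement is the Claim_ definition above) =====
theorem PaulosTeamFormation_spec : Claim_equal_PaulosTeamFormation := by
  unfold Claim_equal_PaulosTeamFormation
  intro n arr _ hpre
  unfold Spec_PaulosTeamFormation
  unfold Pre_PaulosTeamFormation at hpre
  show pvLoopAGo (PySem.List.sorted arr (fun x => x) false) n
      (n.toNat + (PySem.List.sorted arr (fun x => x) false).length) 0 0 0 =
    (PySem.List.pyRange 0 n 1).foldl (fun count i =>
      match PySem.List.pyGet? (PySem.List.sorted arr (fun x => x) false) i with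
      | some v => max count (pvBisect (PySem.List.sorted arr (fun x => x) false) (v + 5) i n - i)
      | none => count) 0
  set s := PySem.List.sorted arr (fun x => x) false with hs
  have hslen : s.length = arr.length := PySem.List.length_sorted arr _ _
  have hmono := pvSortedMono arr
  rw [← hs] at hmono
  by_cases hn : n ≤ 0
  · rw [PySem.List.pyRange_one_eq_nil hn]
    simp only [List.foldl_nil]
    have hfz : n.toNat + s.length = 0 + s.length := by omega
    rw [hfz]
    cases hsl : s.length with
    | zero => simp only [pvLoopAGo]
    | succ k => simp only [pvLoopAGo, if_neg (by omega : ¬(0 : Int) < n)]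
  · have hn0 : 0 ≤ n := by omega
    rw [pvLoopAGo_eq s n hmono (by omega) (n.toNat + s.length) 0 0 0 (by omega) (by omega)
          (by omega) (by omega) (by simp [pvBest2_zero]) (by intro i hi _; omega)]
    have hnm : n = ((n.toNat : Nat) : Int) := by omega
    rw [show PySem.List.pyRange 0 n 1 = PySem.List.pyRange 0 ((n.toNat : Nat) : Int) 1 from by
          rw [← hnm]]
    rw [pvFoldB s n hmono (by omega) n.toNat (by omega)]
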